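-- pv_equiv track=rewrite | github.com/mraicu/Algorithmics | subsequenceCount.py | getSubsequenceCount
-- ===== SOURCE A (Python) =====
-- def getSubsequenceCount(hname, buffer):
--     nr = 0
--     for i in range(len(buffer) - 2):
--         if hname[0] == buffer[i]:
--             for j in range(i + 1, len(buffer) - 1):
--                 if hname[1] == buffer[j]:
--                     for k in range(j + 1, len(buffer)):
--                         if hname[2] == buffer[k]:
--                             nr += 1
--
--     return nr
-- ===== SOURCE B (Python) =====
-- def getSubsequenceCount(hname, buffer):
--     # single-pass DP: counts of matched prefixes of length 1, 2, 3
--     h0, h1, h2 = hname[0], hname[1], hname[2]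
--     c1 = c2 = c3 = 0
--     for ch in buffer:
--         if ch == h2:
--             c3 += c2
--         if ch == h1:
--             c2 += c1
--         if ch == h0:
--             c1 += 1
--     return c3
-- ===== Notes on version B (the rewrite author's own statement) =====
-- stated objective: faster
-- what changed: replaced the triple nested index loops by a single left-to-right pass maintaining counts of matched pattern prefixes of lengths 1, 2 and 3
-- outside the precondition, e.g. on getSubsequenceCount('ab', 'xyz'): A returns 0, B raises IndexError; on getSubsequenceCount('x', ''): A returns 0, B raises IndexError
import Mathlib
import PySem

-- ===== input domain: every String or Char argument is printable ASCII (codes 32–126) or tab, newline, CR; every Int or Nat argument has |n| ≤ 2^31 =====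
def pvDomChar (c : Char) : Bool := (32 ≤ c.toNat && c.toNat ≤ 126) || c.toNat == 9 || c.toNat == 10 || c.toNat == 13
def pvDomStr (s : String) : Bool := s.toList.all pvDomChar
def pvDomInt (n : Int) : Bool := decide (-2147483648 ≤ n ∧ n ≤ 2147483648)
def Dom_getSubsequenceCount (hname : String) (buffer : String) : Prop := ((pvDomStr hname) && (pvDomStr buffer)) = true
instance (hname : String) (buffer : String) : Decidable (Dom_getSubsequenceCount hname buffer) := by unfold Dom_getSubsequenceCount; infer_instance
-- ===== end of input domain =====

-- ===== PORT A =====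
-- B replaces A's triple nested index loops by a single-pass prefix-match DP.
def getSubsequenceCount (hname : String) (buffer : String) : Int :=
  let h := hname.toList
  let b := buffer.toList
  (PySem.List.pyRange 0 ((b.length : Int) - 2) 1).foldl (fun nr i =>
    if PySem.List.pyGet? h 0 = PySem.List.pyGet? b i then
      (PySem.List.pyRange (i + 1) ((b.length : Int) - 1) 1).foldl (fun nr j =>
        if PySem.List.pyGet? h 1 = PySem.List.pyGet? b j then
          (PySem.List.pyRange (j + 1) (b.length : Int) 1).foldl (fun nr k =>
            if PySem.List.pyGet? h 2 = PySem.List.pyGet? b k then nr + 1 else nr) nr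
        else nr) nr
    else nr) 0

-- ===== PORT B =====
def getSubsequenceCount_alt (hname : String) (buffer : String) : Int :=
  let h := hname.toList
  let h0 := PySem.List.pyGet? h 0
  let h1 := PySem.List.pyGet? h 1
  let h2 := PySem.List.pyGet? h 2
  (buffer.toList.foldl (fun (s : Int × Int × Int) ch =>
    (if some ch = h0 then s.1 + 1 else s.1,
     if some ch = h1 then s.2.1 + s.1 else s.2.1,
     if some ch = h2 then s.2.2 + s.2.1 else s.2.2)) ((0 : Int), (0 : Int), (0 : Int))).2.2

-- ===== PRECONDITION & SPEC =====
-- Pre_ restricts to the function's natural domain of length-3 patterns: on shorter hname A raises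
-- IndexError whenever a partial match occurs, and on the remaining short-hname inputs (where A
-- happens to return 0 because no partial match is reached) B raises IndexError, since it
-- destructures hname up front.
def Pre_getSubsequenceCount (hname : String) (buffer : String) : Prop := 3 ≤ hname.toList.length
instance (hname : String) (buffer : String) : Decidable (Pre_getSubsequenceCount hname buffer) := by
  unfold Pre_getSubsequenceCount; infer_instance
def pvWitness_getSubsequenceCount : String × String := ("abc", "aabbcc")
def Spec_getSubsequenceCount (hname : String) (buffer : String) (out : Int) : Prop := out = getSubsequenceCount_alt hname buffer
instance (hname : String) (buffer : String) (out : Int) : Decidable (Spec_getSubsequenceCount hname buffer out) := by unfold Spec_getSubsequenceCount; infer_instance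

-- ===== CLAIM (what is proved, stated in full; the proofs are below) =====
def Claim_equal_getSubsequenceCount : Prop := ∀ (hname : String) (buffer : String), Dom_getSubsequenceCount hname buffer → Pre_getSubsequenceCount hname buffer → Spec_getSubsequenceCount hname buffer (getSubsequenceCount hname buffer)

-- ===== LEMMAS AND PROOFS =====

-- number of positions of l holding hc
def pvCnt1 (hc : Char) : List Char → Int
  | [] => 0
  | c :: t => (if hc = c then 1 else 0) + pvCnt1 hc t

-- number of index pairs i < j with l[i] = x, l[j] = y
def pvPairs (x y : Char) : List Char → Int
  | [] => 0
  | c :: t => (if x = c then pvCnt1 y t else 0) + pvPairs x y t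

-- number of index triples i < j < k with l[i] = x, l[j] = y, l[k] = z
def pvTriples (x y z : Char) : List Char → Int
  | [] => 0
  | c :: t => (if x = c then pvPairs y z t else 0) + pvTriples x y z t

lemma pvCnt1_short (hc : Char) : ∀ l : List Char, l.length ≤ 0 → pvCnt1 hc l = 0 := by
  intro l h
  cases l with
  | nil => rfl
  | cons c t => simp at h

lemma pvPairs_short (x y : Char) : ∀ l : List Char, l.length ≤ 1 → pvPairs x y l = 0 := by
  intro l h
  cases l with
  | nil => rfl
  | cons c t =>
    cases t with
    | nil => simp [pvPairs, pvCnt1]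
    | cons d u => simp at h

lemma pvTriples_short (x y z : Char) : ∀ l : List Char, l.length ≤ 2 → pvTriples x y z l = 0 := by
  intro l h
  cases l with
  | nil => rfl
  | cons c t =>
    have ht : t.length ≤ 1 := by simp at h; omega
    have h1 : pvPairs y z t = 0 := pvPairs_short y z t ht
    have h2 : pvTriples x y z t = 0 := pvTriples_short x y z t (by omega)
    simp [pvTriples, h1, h2]

lemma pvCnt1_snoc (hc : Char) (p : List Char) (c : Char) :
    pvCnt1 hc (p ++ [c]) = pvCnt1 hc p + (if hc = c then 1 else 0) := by
  induction p with
  | nil => simp [pvCnt1]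
  | cons d t ih => simp only [List.cons_append, pvCnt1, ih]; ring

lemma pvPairs_snoc (x y : Char) (p : List Char) (c : Char) :
    pvPairs x y (p ++ [c]) = pvPairs x y p + (if y = c then pvCnt1 x p else 0) := by
  induction p with
  | nil => simp [pvPairs, pvCnt1]
  | cons d t ih =>
    simp only [List.cons_append, pvPairs, pvCnt1, ih, pvCnt1_snoc]
    split_ifs <;> ring

lemma pvTriples_snoc (x y z : Char) (p : List Char) (c : Char) :
    pvTriples x y z (p ++ [c]) = pvTriples x y z p + (if z = c then pvPairs x y p else 0) := by
  induction p with
  | nil => simp [pvTriples, pvPairs]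
  | cons d t ih =>
    simp only [List.cons_append, pvTriples, pvPairs, ih, pvPairs_snoc]
    split_ifs <;> ring

-- one level of A's nested loops: a fold over range(a, len(b) - m) of "if match, add g (suffix)"
lemma pv_loop (b : List Char) (hc : Char) (g S : List Char → Int) (m : Nat)
    (hcons : ∀ c t, S (c :: t) = (if hc = c then g t else 0) + S t)
    (hshort : ∀ l : List Char, l.length ≤ m → S l = 0) :
    ∀ (t a : Nat) (nr : Int), b.length - a ≤ t →
      (PySem.List.pyRange (a : Int) ((b.length : Int) - (m : Int)) 1).foldl
        (fun nr j => if some hc = PySem.List.pyGet? b j then nr + g (b.drop (j + 1).toNat) else nr) nr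
      = nr + S (b.drop a) := by
  intro t
  induction t with
  | zero =>
    intro a nr hle
    have ha : b.length ≤ a := by omega
    rw [PySem.List.pyRange_one_eq_nil (by push_cast; omega)]
    rw [List.drop_eq_nil_of_le ha]
    have hS : S [] = 0 := hshort [] (by simp)
    simp [hS]
  | succ t ih =>
    intro a nr hle
    by_cases hin : a + m < b.length
    · have hlt : (a : Int) < (b.length : Int) - (m : Int) := by push_cast; omega
      have halt : a < b.length := by omega
      rw [PySem.List.pyRange_one_cons hlt, List.foldl_cons]
      have hget : PySem.List.pyGet? b (a : Int) = some b[a] := by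
        rw [PySem.List.pyGet?_natCast]; exact List.getElem?_eq_getElem halt
      have hnat : (((a : Nat) : Int) + 1).toNat = a + 1 := by omega
      have hcast : ((a : Nat) : Int) + 1 = ((a + 1 : Nat) : Int) := by push_cast; ring
      rw [hget, hnat, hcast, ih (a + 1) _ (by omega)]
      rw [List.drop_eq_getElem_cons halt, hcons]
      by_cases hif : hc = b[a]
      · simp [hif]; ring
      · have : ¬ (some hc = some b[a]) := by simpa using hif
        simp [hif, this]
    · rw [PySem.List.pyRange_one_eq_nil (by push_cast; omega)]
      have hS : S (b.drop a) = 0 := hshort _ (by simp; omega)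
      simp [hS]

-- pv_loop with an Int starting index (the form A's inner loops actually have)
lemma pv_loop' (b : List Char) (hc : Char) (g S : List Char → Int) (m : Nat)
    (hcons : ∀ c t, S (c :: t) = (if hc = c then g t else 0) + S t)
    (hshort : ∀ l : List Char, l.length ≤ m → S l = 0)
    (a : Int) (ha : 0 ≤ a) (nr : Int) :
    (PySem.List.pyRange a ((b.length : Int) - (m : Int)) 1).foldl
      (fun nr j => if some hc = PySem.List.pyGet? b j then nr + g (b.drop (j + 1).toNat) else nr) nr
    = nr + S (b.drop a.toNat) := by
  have h : a = ((a.toNat : Nat) : Int) := by omega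
  rw [h]
  exact pv_loop b hc g S m hcons hshort b.length a.toNat nr (by omega)

lemma pv_if_flip (c a : Char) (x y : Int) :
    (if c = a then x + y else x) = x + (if a = c then y else 0) := by
  rcases eq_or_ne c a with h | h
  · subst h; simp
  · rw [if_neg h, if_neg (fun hh => h hh.symm)]; ring

-- the DP invariant for B: after folding a prefix p the state is (count, pairs, triples) of p
lemma pv_dp (a0 a1 a2 : Char) (p : List Char) :
    p.foldl (fun (s : Int × Int × Int) ch =>
      (if some ch = some a0 then s.1 + 1 else s.1,
       if some ch = some a1 then s.2.1 + s.1 else s.2.1,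
       if some ch = some a2 then s.2.2 + s.2.1 else s.2.2)) ((0 : Int), (0 : Int), (0 : Int))
    = (pvCnt1 a0 p, pvPairs a0 a1 p, pvTriples a0 a1 a2 p) := by
  induction p using List.reverseRecOn with
  | nil => simp [pvCnt1, pvPairs, pvTriples]
  | append_singleton p c ih =>
    rw [List.foldl_append, ih, List.foldl_cons, List.foldl_nil]
    simp only [Option.some.injEq, pvCnt1_snoc, pvPairs_snoc, pvTriples_snoc, Prod.mk.injEq]
    exact ⟨pv_if_flip c a0 _ _, pv_if_flip c a1 _ _, pv_if_flip c a2 _ _⟩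

-- ===== VERDICT (by name: the statement is the Claim_ definition above) =====
theorem getSubsequenceCount_spec : Claim_equal_getSubsequenceCount := by
  intro hname buffer _ hpre
  unfold Spec_getSubsequenceCount getSubsequenceCount getSubsequenceCount_alt
  obtain ⟨a0, a1, a2, rest, hh⟩ : ∃ a0 a1 a2 rest, hname.toList = a0 :: a1 :: a2 :: rest := by
    match hl : hname.toList with
    | a0 :: a1 :: a2 :: rest => exact ⟨a0, a1, a2, rest, rfl⟩
    | [] | [_] | [_, _] =>
      unfold Pre_getSubsequenceCount at hpre; rw [hl] at hpre; simp at hpre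
  rw [hh]
  have hg0 : PySem.List.pyGet? (a0 :: a1 :: a2 :: rest) (0 : Int) = some a0 := by
    simp [PySem.List.pyGet?_zero_cons]
  have hg1 : PySem.List.pyGet? (a0 :: a1 :: a2 :: rest) (1 : Int) = some a1 := by
    rw [show (1 : Int) = ((0 : Nat) : Int) + 1 by norm_num, PySem.List.pyGet?_cons_succ]
    simp
  have hg2 : PySem.List.pyGet? (a0 :: a1 :: a2 :: rest) (2 : Int) = some a2 := by
    rw [show (2 : Int) = ((1 : Nat) : Int) + 1 by norm_num, PySem.List.pyGet?_cons_succ,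
      show ((1 : Nat) : Int) = ((0 : Nat) : Int) + 1 by norm_num, PySem.List.pyGet?_cons_succ]
    simp [PySem.List.pyGet?_zero_cons]
  simp only [hg0, hg1, hg2]
  set b := buffer.toList with hb
  -- the innermost loop counts occurrences of a2 in the suffix
  have hinner : ∀ (a : Int), 0 ≤ a → ∀ nr : Int,
      (PySem.List.pyRange a ((b.length : Int)) 1).foldl
        (fun nr k => if some a2 = PySem.List.pyGet? b k then nr + 1 else nr) nr
      = nr + pvCnt1 a2 (b.drop a.toNat) := by
    intro a ha nr
    have h := pv_loop' b a2 (fun _ => (1 : Int)) (pvCnt1 a2) 0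
      (fun c t => rfl) (pvCnt1_short a2) a ha nr
    simpa using h
  -- the middle loop counts (a1, a2)-pairs in the suffix
  have hmid : ∀ (a : Int), 0 ≤ a → ∀ nr : Int,
      (PySem.List.pyRange a ((b.length : Int) - 1) 1).foldl
        (fun nr j => if some a1 = PySem.List.pyGet? b j then
            (PySem.List.pyRange (j + 1) ((b.length : Int)) 1).foldl
              (fun nr k => if some a2 = PySem.List.pyGet? b k then nr + 1 else nr) nr
          else nr) nr
      = nr + pvPairs a1 a2 (b.drop a.toNat) := by
    intro a ha nr
    rw [PySem.List.foldl_congr_mem _ _ (fun nr j =>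
      if some a1 = PySem.List.pyGet? b j then nr + pvCnt1 a2 (b.drop (j + 1).toNat) else nr) _
      (by
        intro acc j hj
        have hj0 : a ≤ j := (PySem.List.mem_pyRange_one.mp hj).1
        simp only
        rw [hinner (j + 1) (by omega) acc])]
    have h := pv_loop' b a1 (pvCnt1 a2) (pvPairs a1 a2) 1
      (fun c t => rfl) (pvPairs_short a1 a2) a ha nr
    simpa using h
  trans pvTriples a0 a1 a2 b
  · -- A's outer loop
    rw [PySem.List.foldl_congr_mem _ _ (fun nr i =>
      if some a0 = PySem.List.pyGet? b i then nr + pvPairs a1 a2 (b.drop (i + 1).toNat) else nr) _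
      (by
        intro acc i hi
        have hi0 : (0 : Int) ≤ i := (PySem.List.mem_pyRange_one.mp hi).1
        simp only
        rw [hmid (i + 1) (by omega) acc])]
    have h := pv_loop' b a0 (pvPairs a1 a2) (pvTriples a0 a1 a2) 2
      (fun c t => rfl) (pvTriples_short a0 a1 a2) 0 (by norm_num) 0
    simpa using h
  · -- B's single pass
    rw [pv_dp a0 a1 a2 b]
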